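-- pv_equiv track=rewrite | github.com/SachinthaGunathilaka/Fiverr-All-Projects | Python/acmacmac/main.py | solution
-- ===== SOURCE A (Python) =====
-- def solution(A):
--     count = 0
--     for i in range(len(A)):
--         is_shine = True
--         prev = 1
--         for j in range(0, i+1):
--             if prev not in A[0:i+1]:
--                 is_shine = False
--             prev += 1
--
--         if is_shine:
--             count += 1
--
--     return count
-- ===== SOURCE B (Python) =====
-- def solution(A):
--     # One forward pass: track the set of values seen and how many of 1..L are missing.
--     seen = set()
--     missing = 0
--     count = 0
--     for i, x in enumerate(A):
--         L = i + 1
--         if L not in seen: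
--             missing += 1
--         if x not in seen and 1 <= x <= L:
--             missing -= 1
--         seen.add(x)
--         if missing == 0:
--             count += 1
--     return count
-- ===== Notes on version B (the rewrite author's own statement) =====
-- stated objective: faster
-- what changed: A rescans the whole prefix for every required value of every prefix (cubic); B makes one forward pass keeping a seen-set and a counter of how many of 1..L are still missing, counting a prefix exactly when the counter is zero.
import Mathlib
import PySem

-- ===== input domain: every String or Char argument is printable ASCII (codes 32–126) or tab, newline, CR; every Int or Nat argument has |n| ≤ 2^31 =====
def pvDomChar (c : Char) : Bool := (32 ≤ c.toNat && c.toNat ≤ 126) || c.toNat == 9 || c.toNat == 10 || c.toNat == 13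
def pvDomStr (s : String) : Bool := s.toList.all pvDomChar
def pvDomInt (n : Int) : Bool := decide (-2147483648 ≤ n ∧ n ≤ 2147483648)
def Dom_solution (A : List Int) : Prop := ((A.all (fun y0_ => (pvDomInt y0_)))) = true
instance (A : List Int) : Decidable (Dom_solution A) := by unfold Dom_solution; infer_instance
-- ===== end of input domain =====

-- B replaces A's quadratic per-prefix membership rescans by one forward pass that keeps
-- the set of values seen and a counter of how many of 1..L are still missing.

-- ===== PORT A =====
def solution (A : List Int) : Int :=
  (PySem.List.pyRange 0 (PySem.List.len A) 1).foldl (fun count i =>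
    let st := (PySem.List.pyRange 0 (i + 1) 1).foldl
      (fun (s : Bool × Int) _j =>
        ((if (PySem.List.slice A (some 0) (some (i + 1))).contains s.2 then s.1 else false),
         s.2 + 1))
      (true, 1)
    if st.1 then count + 1 else count) 0

-- ===== PORT B =====
-- loop body of B's single pass: state = (seen, missing, count)
def solnStep (st : PySem.Set Int × Int × Int) (ix : Int × Int) : PySem.Set Int × Int × Int :=
  let i := ix.1
  let x := ix.2
  let seen := st.1
  let missing := st.2.1
  let count := st.2.2
  let L := i + 1
  let missing := if seen.contains L then missing else missing + 1
  let missing := if ¬ seen.contains x ∧ 1 ≤ x ∧ x ≤ L then missing - 1 else missing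
  let seen := PySem.Set.add seen x
  let count := if missing = 0 then count + 1 else count
  (seen, missing, count)

def solution_alt (A : List Int) : Int :=
  ((PySem.List.enumerate A 0).foldl solnStep (PySem.Set.empty, 0, 0)).2.2

-- ===== PRECONDITION & SPEC =====
def Spec_solution (A : List Int) (out : Int) : Prop := out = solution_alt A
instance (A : List Int) (out : Int) : Decidable (Spec_solution A out) := by unfold Spec_solution; infer_instance

-- ===== CLAIM (what is proved, stated in full; the proofs are below) =====
def Claim_equal_solution : Prop := ∀ (A : List Int), Dom_solution A → Spec_solution A (solution A)

-- ===== LEMMAS AND PROOFS =====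

def pvMiss (p : List Int) : Nat :=
  List.countP (fun (k : Nat) => decide (((1 : Int) + k) ∉ p)) (List.range p.length)

theorem pv_countP_and_ne (l : List Nat) (k0 : Nat) (q : Nat → Bool)
    (hnd : l.Nodup) (hk : k0 ∈ l) (hq : q k0 = true) :
    (l.countP fun k => q k && !(k == k0)) + 1 = l.countP q := by
  induction l with
  | nil => simp at hk
  | cons a l ih =>
    rcases List.nodup_cons.mp hnd with ⟨ha, hnd'⟩
    rcases List.mem_cons.mp hk with h | h
    · subst h
      have : (l.countP fun k => q k && !(k == k0)) = l.countP q := by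
        apply List.countP_congr
        intro k hkl
        have : k ≠ k0 := fun h => ha (h ▸ hkl)
        simp [this]
      simp [hq, this]
    · have hne : a ≠ k0 := fun hEq => ha (hEq ▸ h)
      have := ih hnd' h
      simp only [List.countP_cons]
      by_cases hqa : q a = true <;> simp [hqa, hne] <;> omega

theorem pv_C1 (pre : List Int) :
    (List.countP (fun (k : Nat) => decide (((1 : Int) + k) ∉ pre)) (List.range (pre.length + 1)) : Int)
    = (pvMiss pre : Int) + (if ((pre.length : Int) + 1) ∈ pre then 0 else 1) := by
  unfold pvMiss
  rw [List.range_succ, List.countP_append]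
  have h1 : ((1 : Int) + pre.length) = ((pre.length : Int) + 1) := by ring
  by_cases h : ((pre.length : Int) + 1) ∈ pre <;>
    simp [List.countP_cons, h1, h] <;> push_cast <;> ring

theorem pv_miss_append_notmem (pre : List Int) (x : Int)
    (hx : x ∉ pre) (h1 : 1 ≤ x) (h2 : x ≤ (pre.length : Int) + 1) :
    (pvMiss (pre ++ [x]) : Int) + 1
    = (List.countP (fun (k : Nat) => decide (((1 : Int) + k) ∉ pre)) (List.range (pre.length + 1)) : Int) := by
  have hlen : (pre ++ [x]).length = pre.length + 1 := by simp
  set k0 : Nat := (x - 1).toNat with hk0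
  have hxk0 : ((1 : Int) + k0) = x := by omega
  have hmem : k0 ∈ List.range (pre.length + 1) := by
    rw [List.mem_range]; omega
  have key := pv_countP_and_ne (List.range (pre.length + 1)) k0
    (fun (k : Nat) => decide (((1 : Int) + k) ∉ pre))
    (List.nodup_range) hmem (by simp [hxk0, hx])
  have hcongr : (List.countP (fun (k : Nat) => decide (((1 : Int) + k) ∉ pre ++ [x])) (List.range (pre.length + 1)))
      = (List.countP (fun k => (fun (k : Nat) => decide (((1 : Int) + k) ∉ pre)) k && !(k == k0)) (List.range (pre.length + 1))) := by
    apply List.countP_congr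
    intro k hkr
    simp only [List.mem_append, List.mem_singleton, decide_eq_true_eq, Bool.and_eq_true,
      Bool.not_eq_true', beq_eq_false_iff_ne]
    constructor
    · intro h
      push_neg at h
      exact ⟨h.1, fun hkk => h.2 (by omega)⟩
    · intro ⟨ha, hb⟩
      push_neg
      exact ⟨ha, fun hc => hb (by omega)⟩
  unfold pvMiss
  rw [hlen, hcongr]
  exact_mod_cast key

theorem pv_miss_append_other (pre : List Int) (x : Int)
    (h : x ∈ pre ∨ ¬(1 ≤ x ∧ x ≤ (pre.length : Int) + 1)) :
    pvMiss (pre ++ [x])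
    = List.countP (fun (k : Nat) => decide (((1 : Int) + k) ∉ pre)) (List.range (pre.length + 1)) := by
  have hlen : (pre ++ [x]).length = pre.length + 1 := by simp
  unfold pvMiss
  rw [hlen]
  apply List.countP_congr
  intro k hkr
  rw [List.mem_range] at hkr
  simp only [List.mem_append, List.mem_singleton, decide_eq_true_eq]
  constructor
  · intro hno
    push_neg at hno
    exact hno.1
  · intro hno
    push_neg
    refine ⟨hno, ?_⟩
    rcases h with h | h
    · intro he; exact hno (he ▸ h)
    · intro he; rw [← he] at h; push_neg at h
      have : (1 : Int) ≤ 1 + k := by omega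
      have := h this
      omega

theorem pv_all_eq_countP_zero {α : Type} (l : List α) (q : α → Bool) :
    l.all q = (l.countP (fun k => !q k) == 0) := by
  induction l with
  | nil => simp
  | cons a l ih =>
    simp only [List.all_cons, List.countP_cons, ih]
    cases q a <;> simp

theorem pv_innerFold {γ : Type} (sl : List Int) (l : List γ) (b : Bool) (p : Int) :
    l.foldl
      (fun (s : Bool × Int) (_j : γ) =>
        ((if sl.contains s.2 then s.1 else false), s.2 + 1)) (b, p)
    = (b && (List.range l.length).all (fun k => sl.contains (p + (k : Int))), p + l.length) := by
  induction l generalizing b p with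
  | nil => simp
  | cons a l ih =>
    simp only [List.foldl_cons, ih, Prod.mk.injEq]
    refine ⟨?_, by simp only [List.length_cons]; push_cast; ring⟩
    have hf : (fun (k : Nat) => sl.contains (p + 1 + (k : Int)))
        = (fun (k : Nat) => sl.contains (p + ((k + 1 : Nat) : Int))) := by
      funext k
      congr 1
      push_cast
      ring
    simp only [List.length_cons, List.range_succ_eq_map, List.all_cons, List.all_map,
      Function.comp_def, Nat.cast_zero, add_zero, hf]
    cases hc : sl.contains p <;> cases b <;> simp

theorem solution_eq_spec (A : List Int) :
    solution A = ((List.range A.length).countP (fun i => pvMiss (A.take (i + 1)) == 0) : Int) := by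
  unfold solution
  simp only [PySem.List.len_eq, PySem.List.pyRange_zero_nat, List.foldl_map]
  rw [PySem.List.foldl_congr_mem'
    (g := fun (c : Int) (i : Nat) => if pvMiss (A.take (i + 1)) == 0 then c + 1 else c)]
  · rw [PySem.List.foldl_if_add_one]
    simp
  · intro i hi c
    have hilt : i < A.length := List.mem_range.mp hi
    simp only [pv_innerFold]
    have h1 : ((i : Int) + 1) = ((i + 1 : Nat) : Int) := by push_cast; ring
    rw [h1, PySem.List.slice_zero_start, PySem.List.slice_to_natCast,
        PySem.List.length_pyRange_one]
    have h2 : (((i + 1 : Nat) : Int) - 0).toNat = i + 1 := by omega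
    rw [h2]
    have hlen : (A.take (i + 1)).length = i + 1 := by
      simp [List.length_take]; omega
    have hcnt : List.countP (fun (k : Nat) => !(A.take (i+1)).contains (1 + (k : Int))) (List.range (i+1))
        = pvMiss (A.take (i+1)) := by
      unfold pvMiss
      rw [hlen]
      apply List.countP_congr
      intro k _
      simp
    have hall : ((List.range (i + 1)).all fun k => (A.take (i+1)).contains (1 + (k : Int)))
        = (pvMiss (A.take (i + 1)) == 0) := by
      rw [pv_all_eq_countP_zero, hcnt]
    simp only [Bool.true_and, hall]

theorem pv_step (pre : List Int) (x : Int) (c : Int) :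
    solnStep (PySem.Set.ofList pre, (pvMiss pre : Int), c) ((pre.length : Int), x)
    = (PySem.Set.ofList (pre ++ [x]), (pvMiss (pre ++ [x]) : Int),
       c + if pvMiss (pre ++ [x]) = 0 then 1 else 0) := by
  have hc : ∀ v : Int, (PySem.Set.ofList pre).contains v = decide (v ∈ pre) := by
    intro v
    simp [PySem.Set.contains_eq_listContains, PySem.Set.mem_ofList]
  have hseen : (PySem.Set.ofList pre).add x = PySem.Set.ofList (pre ++ [x]) :=
    (PySem.Set.ofList_append_singleton pre x).symm
  have hm1 : (if (PySem.Set.ofList pre).contains ((pre.length : Int) + 1) = true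
        then ((pvMiss pre : Int)) else (pvMiss pre : Int) + 1)
      = (List.countP (fun (k : Nat) => decide (((1 : Int) + k) ∉ pre)) (List.range (pre.length + 1)) : Int) := by
    rw [hc, pv_C1 pre]
    by_cases hL : ((pre.length : Int) + 1) ∈ pre <;> simp [hL]
  have hm2 : (if ¬(PySem.Set.ofList pre).contains x = true ∧ 1 ≤ x ∧ x ≤ (pre.length : Int) + 1
        then (if (PySem.Set.ofList pre).contains ((pre.length : Int) + 1) = true
          then ((pvMiss pre : Int)) else (pvMiss pre : Int) + 1) - 1
        else (if (PySem.Set.ofList pre).contains ((pre.length : Int) + 1) = true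
          then ((pvMiss pre : Int)) else (pvMiss pre : Int) + 1))
      = (pvMiss (pre ++ [x]) : Int) := by
    rw [hm1, hc]
    by_cases hcond : ¬(x ∈ pre) ∧ 1 ≤ x ∧ x ≤ (pre.length : Int) + 1
    · rw [if_pos (by simpa using hcond)]
      have := pv_miss_append_notmem pre x hcond.1 hcond.2.1 hcond.2.2
      omega
    · rw [if_neg (by simpa using hcond)]
      have h : x ∈ pre ∨ ¬(1 ≤ x ∧ x ≤ (pre.length : Int) + 1) := by tauto
      rw [pv_miss_append_other pre x h]
  unfold solnStep
  dsimp only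
  rw [Prod.mk.injEq, Prod.mk.injEq]
  refine ⟨hseen, hm2, ?_⟩
  rw [hm2]
  by_cases hz : pvMiss (pre ++ [x]) = 0 <;> simp [hz]

theorem pv_loop (rest pre : List Int) (c : Int) :
    ((PySem.List.enumerate rest (pre.length : Int)).foldl solnStep
       (PySem.Set.ofList pre, (pvMiss pre : Int), c)).2.2
    = c + (List.countP (fun (j : Nat) => pvMiss ((pre ++ rest).take (pre.length + j + 1)) == 0)
        (List.range rest.length) : Int) := by
  induction rest generalizing pre c with
  | nil => simp [PySem.List.enumerate_nil]
  | cons x rest ih =>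
    rw [PySem.List.enumerate_cons, List.foldl_cons, pv_step]
    have hlen : ((pre.length : Int) + 1) = (((pre ++ [x]).length : Nat) : Int) := by
      simp
    rw [hlen, ih (pre ++ [x]) _]
    have htake : (pre ++ x :: rest).take (pre.length + 1) = pre ++ [x] := by
      rw [show pre.length + 1 = pre.length + 1 from rfl]
      rw [List.take_append]
      simp
    have hshift : (List.countP (fun (j : Nat) => pvMiss (((pre ++ [x]) ++ rest).take ((pre ++ [x]).length + j + 1)) == 0)
          (List.range rest.length))
        = (List.countP (fun (j : Nat) => pvMiss ((pre ++ x :: rest).take (pre.length + (j + 1) + 1)) == 0)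
          (List.range rest.length)) := by
      apply List.countP_congr
      intro j _
      have h1 : (pre ++ [x]) ++ rest = pre ++ x :: rest := by simp
      have h2 : (pre ++ [x]).length + j + 1 = pre.length + (j + 1) + 1 := by simp; omega
      rw [h1, h2]
    rw [hshift]
    have hsplit : (List.countP (fun (j : Nat) => pvMiss ((pre ++ x :: rest).take (pre.length + j + 1)) == 0)
          (List.range (x :: rest).length))
        = (if pvMiss (pre ++ [x]) == 0 then 1 else 0)
          + List.countP (fun (j : Nat) => pvMiss ((pre ++ x :: rest).take (pre.length + (j + 1) + 1)) == 0)
            (List.range rest.length) := by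
      rw [List.length_cons, List.range_succ_eq_map, List.countP_cons, List.countP_map]
      rw [show pre.length + 0 + 1 = pre.length + 1 by omega, htake]
      simp only [Function.comp_def]
      by_cases hz : pvMiss (pre ++ [x]) == 0 <;> simp [hz] <;> omega
    rw [hsplit]
    push_cast
    by_cases hz : pvMiss (pre ++ [x]) = 0 <;> simp [hz] <;> ring

theorem solution_alt_eq_spec (A : List Int) :
    solution_alt A = ((List.range A.length).countP (fun i => pvMiss (A.take (i + 1)) == 0) : Int) := by
  unfold solution_alt
  have h := pv_loop A [] 0
  simp only [List.nil_append, List.length_nil, Nat.cast_zero, zero_add] at h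
  exact h

-- ===== VERDICT (by name: the statement is the Claim_ definition above) =====
theorem solution_spec : Claim_equal_solution := by
  intro A _
  unfold Spec_solution
  rw [solution_eq_spec, solution_alt_eq_spec]
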